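-- pv_equiv track=rewrite | github.com/tomdif/causal-algebraic-geometry-lean | scripts/cag_divisibility.py | count_CC_div
-- ===== SOURCE A (Python) =====
-- def divisors(n: int):
--     """All positive divisors of n."""
--     result = []
--     i = 1
--     while i * i <= n:
--         if n % i == 0:
--             result.append(i)
--             if i * i != n:
--                 result.append(n // i)
--         i += 1
--     return sorted(result)
--
-- def is_div_convex(S: frozenset) -> bool:
--     """Test whether S ⊆ ℕ_+ is convex in the divisibility poset."""
--     lst = sorted(S)
--     for i, a in enumerate(lst):
--         for b in lst[i + 1:]:
--             if b % a == 0: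
--                 # Divisibility interval [a, b] = {a * d : d divides b/a}.
--                 ratio = b // a
--                 for d in divisors(ratio):
--                     c = a * d
--                     if c not in S:
--                         return False
--     return True
--
-- def count_CC_div(N: int) -> int:
--     """|CC_div(N)| via brute force over subsets of {1, ..., N}."""
--     total = 0
--     elements = list(range(1, N + 1))
--     # Enumerate by bitmask
--     for mask in range(1 << N):
--         S = frozenset(e for i, e in enumerate(elements) if (mask >> i) & 1)
--         if is_div_convex(S):
--             total += 1
--     return total
-- ===== SOURCE B (Python) =====
-- def is_div_convex(S):
--     """Convex iff no missing c (1..max(S)) has both a divisor and a multiple in S."""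
--     if not S:
--         return True
--     m = max(S)
--     for c in range(1, m + 1):
--         if c in S:
--             continue
--         if any(c % a == 0 for a in S) and any(b % c == 0 for b in S):
--             return False
--     return True
--
-- def count_CC_div(N: int) -> int:
--     total = 0
--     for mask in range(1 << N):
--         S = {e for e in range(1, N + 1) if (mask >> (e - 1)) & 1}
--         if is_div_convex(S):
--             total += 1
--     return total
-- ===== Notes on version B (the rewrite author's own statement) =====
-- stated objective: simpler
-- what changed: Convexity is tested by scanning each missing c in 1..max(S) for a divisor and a multiple in S, replacing the sorted-pairs plus divisors-of-ratio interval check and dropping the divisors helper; the outer bitmask enumeration is kept.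
import Mathlib
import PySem

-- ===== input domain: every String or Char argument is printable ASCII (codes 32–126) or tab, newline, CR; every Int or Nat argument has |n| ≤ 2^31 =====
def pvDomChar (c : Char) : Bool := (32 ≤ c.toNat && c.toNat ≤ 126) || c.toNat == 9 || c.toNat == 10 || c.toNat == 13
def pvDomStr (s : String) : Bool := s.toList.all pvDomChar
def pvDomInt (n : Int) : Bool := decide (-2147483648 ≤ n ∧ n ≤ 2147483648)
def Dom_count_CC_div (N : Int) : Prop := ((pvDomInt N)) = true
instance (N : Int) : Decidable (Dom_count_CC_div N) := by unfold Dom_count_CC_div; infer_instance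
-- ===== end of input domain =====

-- B tests convexity by scanning the complement (each missing c in 1..max(S) for a divisor and a
-- multiple in S) instead of A's sorted-pairs + divisors-of-the-ratio interval check: simpler, no
-- divisors helper. Equivalence of the return value is proved on Pre_ (nonnegative N; A raises otherwise).

-- ===== PORT A =====
-- while i*i <= n loop, ported as a fold over i = 1..n with the loop guard kept
-- (exact: appends happen precisely for the i the while loop visits).
def pyDivisors (n : Int) : List Int :=
  PySem.List.sorted
    ((PySem.List.pyRange 1 (n + 1) 1).foldl
      (fun res i =>
        if i * i ≤ n ∧ PySem.Int.mod n i = 0 then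
          res ++ [i] ++ (if i * i ≠ n then [PySem.Int.floordiv n i] else [])
        else res)
      [])
    (fun x => x) false

-- body of the inner "if b % a == 0: for d in divisors(b//a): if a*d not in S: return False"
def chkPair (S : List Int) (a b : Int) : Bool :=
  if PySem.Int.mod b a = 0 then
    (pyDivisors (PySem.Int.floordiv b a)).all (fun d => S.contains (a * d))
  else true

-- "for i, a in enumerate(lst): for b in lst[i+1:]" — the tail IS lst[i+1:]
def pairsAll (S : List Int) : List Int → Bool
  | [] => true
  | a :: rest => rest.all (fun b => chkPair S a b) && pairsAll S rest

def isDivConvexA (S : List Int) : Bool :=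
  pairsAll S (PySem.List.sorted S (fun x => x) false)

def count_CC_div (N : Int) : Int :=
  -- (mask >> i) & 1 == 1 is Nat.testBit (mask, i ≥ 0 on Pre_); 1 << N is 2 ^ N.toNat (0 ≤ N on Pre_)
  (PySem.List.pyRange 0 (2 ^ N.toNat) 1).foldl
    (fun total mask =>
      let S : PySem.Set Int := PySem.Set.ofList
        ((PySem.List.enumerate (PySem.List.pyRange 1 (N + 1) 1)).foldl
          (fun acc p => if Nat.testBit mask.toNat p.1.toNat then acc ++ [p.2] else acc) [])
      if isDivConvexA S then total + 1 else total)
    0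

-- ===== PORT B =====
def isDivConvexB (S : List Int) : Bool :=
  match PySem.List.max? S (fun x => x) with
  | none => true        -- "if not S: return True"
  | some m =>
    (PySem.List.pyRange 1 (m + 1) 1).all (fun c =>
      S.contains c ||
        !((S.any fun a => PySem.Int.mod c a = 0) && (S.any fun b => PySem.Int.mod b c = 0)))

def count_CC_div_alt (N : Int) : Int :=
  (PySem.List.pyRange 0 (2 ^ N.toNat) 1).foldl
    (fun total mask =>
      let S : PySem.Set Int := PySem.Set.ofList
        ((PySem.List.pyRange 1 (N + 1) 1).filter
          (fun e => Nat.testBit mask.toNat (e - 1).toNat))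
      if isDivConvexB S then total + 1 else total)
    0

-- ===== PRECONDITION & SPEC =====
-- Python A raises ValueError ("negative shift count") on negative N; so does B.
def Pre_count_CC_div (N : Int) : Prop := 0 ≤ N
instance (N : Int) : Decidable (Pre_count_CC_div N) := by unfold Pre_count_CC_div; infer_instance
def pvWitness_count_CC_div : Int := (3)

def Spec_count_CC_div (N : Int) (out : Int) : Prop := out = count_CC_div_alt N
instance (N : Int) (out : Int) : Decidable (Spec_count_CC_div N out) := by
  unfold Spec_count_CC_div; infer_instance

-- ===== CLAIM (what is proved, stated in full; the proofs are below) =====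
def Claim_equal_count_CC_div : Prop :=
  ∀ (N : Int), Dom_count_CC_div N → Pre_count_CC_div N → Spec_count_CC_div N (count_CC_div N)

-- ===== LEMMAS AND PROOFS =====

lemma enum_pyRange (b : Int) : ∀ (k : Nat) (a s : Int), (b - a).toNat = k →
    PySem.List.enumerate (PySem.List.pyRange a b 1) s
      = (PySem.List.pyRange a b 1).map (fun e => (s + (e - a), e)) := by
  intro k
  induction k with
  | zero =>
    intro a s hk
    rw [PySem.List.pyRange_one_eq_nil (by omega)]
    simp [PySem.List.enumerate_nil]
  | succ k ih =>
    intro a s hk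
    have hab : a < b := by omega
    rw [PySem.List.pyRange_one_cons hab, PySem.List.enumerate_cons, List.map_cons,
      ih (a + 1) (s + 1) (by omega)]
    have hfun : (fun e => (s + 1 + (e - (a + 1)), e)) = (fun e : Int => (s + (e - a), e)) := by
      funext e; simp; ring
    rw [hfun]
    simp

lemma mem_pyDivisors {n d : Int} (hn : 1 ≤ n) : d ∈ pyDivisors n ↔ 1 ≤ d ∧ d ∣ n := by
  have hfold : ∀ (l : List Int) (acc : List Int),
      l.foldl (fun res i =>
        if i * i ≤ n ∧ PySem.Int.mod n i = 0 then
          res ++ [i] ++ (if i * i ≠ n then [PySem.Int.floordiv n i] else [])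
        else res) acc
      = acc ++ l.flatMap (fun i =>
          if i * i ≤ n ∧ PySem.Int.mod n i = 0 then
            [i] ++ (if i * i ≠ n then [PySem.Int.floordiv n i] else [])
          else []) := by
    intro l
    induction l with
    | nil => intro acc; simp
    | cons i t ih =>
      intro acc
      rw [List.foldl_cons, ih, List.flatMap_cons]
      split_ifs <;> simp
  unfold pyDivisors
  rw [PySem.List.mem_sorted, hfold]
  simp only [List.nil_append, List.mem_flatMap, PySem.List.mem_pyRange_one]
  constructor
  · rintro ⟨i, ⟨hi1, hi2⟩, hd⟩
    by_cases hc : i * i ≤ n ∧ PySem.Int.mod n i = 0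
    · have hdvd : i ∣ n := (PySem.Int.mod_eq_zero_iff_dvd n i).mp hc.2
      obtain ⟨k, hk⟩ := hdvd
      have hk1 : 1 ≤ k := by nlinarith
      have hfd : PySem.Int.floordiv n i = k := by
        rw [PySem.Int.floordiv_eq_ediv_of_pos (by omega), hk,
          Int.mul_ediv_cancel_left k (by omega)]
      rw [if_pos hc] at hd
      rcases List.mem_append.mp hd with hd' | hd'
      · have hdi : d = i := by simpa using hd'
        subst hdi; exact ⟨hi1, ⟨k, hk⟩⟩
      · by_cases hne : i * i ≠ n
        · rw [if_pos hne, hfd] at hd'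
          have hdk : d = k := by simpa using hd'
          subst hdk; exact ⟨hk1, ⟨i, by rw [hk, mul_comm]⟩⟩
        · simp [hne] at hd'
    · simp [hc] at hd
  · rintro ⟨hd1, hdvd⟩
    obtain ⟨k, hk⟩ := hdvd
    have hk1 : 1 ≤ k := by nlinarith
    have hdn : d ≤ n := Int.le_of_dvd (by omega) ⟨k, hk⟩
    by_cases h : d * d ≤ n
    · refine ⟨d, ⟨hd1, by omega⟩, ?_⟩
      have hm : PySem.Int.mod n d = 0 := (PySem.Int.mod_eq_zero_iff_dvd n d).mpr ⟨k, hk⟩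
      simp [h, hm]
    · have hkn : k ≤ n := Int.le_of_dvd (by omega) ⟨d, by rw [hk, mul_comm]⟩
      have hkd : k < d := by nlinarith
      have hkk : k * k ≤ n := by nlinarith
      have hm : PySem.Int.mod n k = 0 := (PySem.Int.mod_eq_zero_iff_dvd n k).mpr ⟨d, by rw [hk, mul_comm]⟩
      have hfd : PySem.Int.floordiv n k = d := by
        rw [PySem.Int.floordiv_eq_ediv_of_pos (by omega), hk,
          Int.mul_ediv_cancel d (by omega)]
      refine ⟨k, ⟨hk1, by omega⟩, ?_⟩
      have hne : k * k ≠ n := by nlinarith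
      simp [hkk, hm, hne, hfd]

lemma chkPair_iff {S : List Int} {a b : Int} (ha : 1 ≤ a) (hb : 1 ≤ b) :
    chkPair S a b = true ↔ (a ∣ b → ∀ c, 1 ≤ c → a ∣ c → c ∣ b → c ∈ S) := by
  unfold chkPair
  split_ifs with h
  · have hdvd : a ∣ b := (PySem.Int.mod_eq_zero_iff_dvd b a).mp h
    obtain ⟨q, hq⟩ := hdvd
    have hq1 : 1 ≤ q := by nlinarith
    have hfd : PySem.Int.floordiv b a = q := by
      rw [PySem.Int.floordiv_eq_ediv_of_pos (by omega), hq,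
        Int.mul_ediv_cancel_left q (by omega)]
    rw [hfd]
    simp only [List.all_eq_true, List.contains_iff_mem]
    constructor
    · intro H _ c hc1 hac hcb
      obtain ⟨k, hk⟩ := hac
      have hk1 : 1 ≤ k := by nlinarith
      obtain ⟨m, hm⟩ := hcb
      have hkq : k ∣ q := by
        refine ⟨m, ?_⟩
        have : a * q = a * (k * m) := by rw [← hq, hm, hk]; ring
        exact mul_left_cancel₀ (by omega) this
      have := H k ((mem_pyDivisors hq1).mpr ⟨hk1, hkq⟩)
      rwa [← hk] at this
    · intro H d hd
      obtain ⟨hd1, hdq⟩ := (mem_pyDivisors hq1).mp hd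
      obtain ⟨m, hm⟩ := hdq
      refine H ⟨q, hq⟩ (a * d) (by nlinarith) ⟨d, rfl⟩ ⟨m, by rw [hq, hm]; ring⟩
  · have hndvd : ¬ a ∣ b := fun hd => h ((PySem.Int.mod_eq_zero_iff_dvd b a).mpr hd)
    simp [hndvd]

lemma pairsAll_iff (S : List Int) (l : List Int) :
    pairsAll S l = true ↔ l.Pairwise (fun a b => chkPair S a b = true) := by
  induction l with
  | nil => simp [pairsAll]
  | cons a t ih => simp [pairsAll, List.pairwise_cons, List.all_eq_true, ih]

lemma isDivConvexA_iff {S : List Int} (hpos : ∀ x ∈ S, 1 ≤ x) :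
    isDivConvexA S = true ↔
      ∀ a ∈ S, ∀ b ∈ S, a ∣ b → ∀ c, 1 ≤ c → a ∣ c → c ∣ b → c ∈ S := by
  unfold isDivConvexA
  rw [pairsAll_iff]
  have hmem : ∀ x : Int, x ∈ PySem.List.sorted S (fun x => x) false ↔ x ∈ S := fun x =>
    PySem.List.mem_sorted S (fun x => x) false x
  have hsort := PySem.List.sorted_pairwise (xs := S) (key := fun x : Int => x)
  rw [List.pairwise_iff_getElem] at hsort ⊢
  constructor
  · intro H a haS b hbS hab c hc1 hac hcb
    have ha1 := hpos a haS
    have hb1 := hpos b hbS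
    by_cases heq : a = b
    · subst heq
      have : c = a := Int.dvd_antisymm (by omega) (by omega) hcb hac
      subst this; exact haS
    · have hlt : a < b := lt_of_le_of_ne (Int.le_of_dvd (by omega) hab) heq
      obtain ⟨i, hi, hia⟩ := List.getElem_of_mem ((hmem a).mpr haS)
      obtain ⟨j, hj, hjb⟩ := List.getElem_of_mem ((hmem b).mpr hbS)
      have hij : i < j := by
        rcases lt_trichotomy i j with h | h | h
        · exact h
        · exfalso; subst h; exact absurd (hia.symm.trans hjb) (by omega)
        · exact absurd (hsort j i hj hi h) (by rw [hia, hjb]; omega)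
      have := H i j hi hj hij
      rw [hia, hjb] at this
      exact (chkPair_iff ha1 hb1).mp this hab c hc1 hac hcb
  · intro H i j hi hj hij
    have haS := (hmem _).mp (List.getElem_mem hi)
    have hbS := (hmem _).mp (List.getElem_mem hj)
    exact (chkPair_iff (hpos _ haS) (hpos _ hbS)).mpr (H _ haS _ hbS)

lemma conv_eq {S : List Int} (hpos : ∀ x ∈ S, 1 ≤ x) :
    isDivConvexA S = isDivConvexB S := by
  cases hmax : PySem.List.max? S (fun x => x) with
  | none =>
    have hS : S = [] := (PySem.List.max?_eq_none_iff S (fun x => x)).mp hmax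
    subst hS; rfl
  | some m =>
    have hmS : m ∈ S := PySem.List.max?_mem hmax
    have hub : ∀ y ∈ S, y ≤ m := PySem.List.max?_isMax hmax
    rw [Bool.eq_iff_iff, isDivConvexA_iff hpos]
    unfold isDivConvexB
    rw [hmax]
    simp only [List.all_eq_true, PySem.List.mem_pyRange_one, Bool.or_eq_true,
      List.contains_iff_mem, Bool.not_eq_true', Bool.and_eq_false_iff, List.any_eq_false,
      PySem.Int.mod_eq_zero_iff_dvd, and_imp, decide_eq_true_eq]
    constructor
    · intro P c hc1 hcm
      by_cases hcS : c ∈ S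
      · exact Or.inl hcS
      · right
        by_cases hdiv : ∃ a ∈ S, a ∣ c
        · right
          intro b hbS hcb
          obtain ⟨a, haS, hac⟩ := hdiv
          exact hcS (P a haS b hbS (hac.trans hcb) c hc1 hac hcb)
        · left
          intro a haS hac
          exact hdiv ⟨a, haS, hac⟩
    · intro Q a haS b hbS hab c hc1 hac hcb
      have hb1 := hpos b hbS
      have hcm : c < m + 1 := by
        have h1 := Int.le_of_dvd (by omega) hcb
        have h2 := hub b hbS
        omega
      rcases Q c hc1 hcm with h | h | h
      · exact h
      · exact absurd hac (h a haS)
      · exact absurd hcb (h b hbS)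

lemma buildS_eq (mask N : Int) :
    ((PySem.List.enumerate (PySem.List.pyRange 1 (N + 1) 1)).foldl
      (fun acc p => if Nat.testBit mask.toNat p.1.toNat then acc ++ [p.2] else acc) [])
    = (PySem.List.pyRange 1 (N + 1) 1).filter (fun e => Nat.testBit mask.toNat (e - 1).toNat) := by
  rw [PySem.List.foldl_append_if, enum_pyRange (N + 1) ((N + 1 - 1).toNat) 1 0 rfl,
    List.filter_map, List.map_map]
  simp [Function.comp_def]

-- ===== VERDICT (by name: the statement is the Claim_ definition above) =====
theorem count_CC_div_spec : Claim_equal_count_CC_div := by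
  intro N _ _
  unfold Spec_count_CC_div count_CC_div count_CC_div_alt
  apply PySem.List.foldl_congr_mem
  intro total mask _
  simp only [buildS_eq]
  have hpos : ∀ x ∈ (PySem.Set.ofList ((PySem.List.pyRange 1 (N + 1) 1).filter
      (fun e => Nat.testBit mask.toNat (e - 1).toNat)) : List Int), 1 ≤ x := by
    intro x hx
    rw [PySem.Set.mem_ofList] at hx
    exact (PySem.List.mem_pyRange_one.mp (List.mem_filter.mp hx).1).1
  rw [conv_eq hpos]
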